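-- pv_equiv track=rewrite | github.com/algebravic/resolving | resolving/generate.py | weight_range
-- ===== SOURCE A (Python) =====
-- from typing import List, Tuple, Iterable, Dict, Set, FrozenSet
--
-- VECTOR = Tuple[int, ...]
--
-- def weight_range(num: int, low: int, high: int) -> Iterable[VECTOR]:
--     """
--     A generator for all 0/1 vectors of length n, whose weight in in [l,h]
--     """
--     if low > high or num < low:
--         return
--     if num == low:
--         yield num * (1,)
--         return
--     if num == 0:
--         return
--     for elt in weight_range(num - 1, low, high):
--         yield (0,) + elt
--     for elt in weight_range(num - 1, max(0, low - 1), high - 1):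
--         yield (1,) + elt
-- ===== SOURCE B (Python) =====
-- def weight_range(num, low, high):
--     """
--     A generator for all 0/1 vectors of length n, whose weight in in [l,h]
--     """
--     if low > high or num < low:
--         return
--     prefixes = [(0, ())]
--     rem = num
--     while rem > 0:
--         rem -= 1
--         prefixes = [(w + b, p + (b,))
--                     for (w, p) in prefixes
--                     for b in (0, 1)
--                     if w + b <= high and low <= w + b + rem]
--     for w, p in prefixes:
--         if low <= w <= high:
--             yield p
-- ===== Notes on version B (the rewrite author's own statement) =====
-- stated objective: alternative
-- what changed: Replaces A's branch-pruning recursive generator over the leading bit with an iterative level-by-level loop that extends a list of (weight, prefix) pairs bit by bit, pruning prefixes that cannot reach a weight in [low, high].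
-- intended difference: When low < 0 <= high and num >= 0, A omits every vector of weight 0 (its num==0 base case returns before yielding the empty tuple, so e.g. weight_range(1,-1,1) yields only (1,)), while B yields all vectors of weight in [low,high] including the all-zeros vector, which is the intended set. — e.g. on weight_range(1, -1, 1): A returns [[1]], B returns [[0], [1]]
-- outside the precondition, e.g. on weight_range(-1, -2, 0): A returns [(0,)], B returns [()]
import Mathlib
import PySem

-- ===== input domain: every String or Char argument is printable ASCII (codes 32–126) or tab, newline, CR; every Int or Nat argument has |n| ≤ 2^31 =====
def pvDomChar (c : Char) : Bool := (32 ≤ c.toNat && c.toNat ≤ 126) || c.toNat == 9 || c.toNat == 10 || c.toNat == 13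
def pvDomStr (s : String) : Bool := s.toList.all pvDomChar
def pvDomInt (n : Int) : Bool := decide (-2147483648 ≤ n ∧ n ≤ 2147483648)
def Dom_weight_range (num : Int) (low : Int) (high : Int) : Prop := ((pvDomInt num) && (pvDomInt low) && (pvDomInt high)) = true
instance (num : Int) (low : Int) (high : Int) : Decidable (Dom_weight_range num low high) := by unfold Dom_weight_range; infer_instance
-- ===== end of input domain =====

-- B replaces A's branch-pruning recursive generator with an iterative level-by-level loop over
-- (weight, prefix) pairs: a structurally different algorithm of similar cost (not claimed faster).


-- ===== PORT A =====
-- Literal port of the Python generator (materialised as the list of yielded vectors;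
-- num * (1,) with negative num is the empty tuple, hence List.replicate num.toNat 1).
-- The recursion is carried by a fuel argument that only makes the same computation total:
-- the fuel (num - low).toNat + num.toNat + 1 strictly dominates the recursion depth
-- (weight_range_unfold below proves the fuel-free unfolding equation).
def weight_range_go (fuel : Nat) (num : Int) (low : Int) (high : Int) : List (List Int) :=
  match fuel with
  | 0 => []
  | f + 1 =>
    if low > high ∨ num < low then []
    else if num = low then [List.replicate num.toNat 1]
    else if num = 0 then []
    else
      (weight_range_go f (num - 1) low high).map (fun elt => 0 :: elt) ++
      (weight_range_go f (num - 1) (max 0 (low - 1)) (high - 1)).map (fun elt => 1 :: elt)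

def weight_range (num : Int) (low : Int) (high : Int) : List (List Int) :=
  weight_range_go ((num - low).toNat + num.toNat + 1) num low high

-- ===== PORT B =====
-- one loop iteration: extend every kept prefix (weight w, tuple p) by bit 0 then bit 1,
-- keeping extensions whose weight can still land in [low, high] (the list comprehension)
def wr_step (low : Int) (high : Int) (prefixes : List (Int × List Int)) (rem : Int) :
    List (Int × List Int) :=
  prefixes.flatMap (fun wp =>
    (([0, 1] : List Int).filter (fun b => decide (wp.1 + b ≤ high ∧ low ≤ wp.1 + b + rem))).map
      (fun b => (wp.1 + b, wp.2 ++ [b])))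

-- the `while rem > 0: rem -= 1; prefixes = …` loop, structurally on rem.toNat
-- (exact: the Python loop runs max(num, 0) times, with rem = m inside iteration m+1)
def wr_loop (low : Int) (high : Int) (prefixes : List (Int × List Int)) :
    Nat → List (Int × List Int)
  | 0 => prefixes
  | m + 1 => wr_loop low high (wr_step low high prefixes (m : Int)) m

def weight_range_alt (num : Int) (low : Int) (high : Int) : List (List Int) :=
  if low > high ∨ num < low then []
  else
    ((wr_loop low high [(0, ([] : List Int))] num.toNat).filter
      (fun wp => decide (low ≤ wp.1 ∧ wp.1 ≤ high))).map (fun wp => wp.2)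

-- ===== PRECONDITION & SPEC =====
-- Pre_ excludes (a) negative num that passes A's guard (low ≤ high and low ≤ num): there A's
-- recursion returns accidental vectors of the wrong length (e.g. weight_range(-1,-2,0) returns
-- [(0,)]) while B returns the weight-filtered [()]; and (b) guard-passing inputs of recursion
-- depth num - max(low,0) above 900, on which CPython's A raises RecursionError (default
-- recursion limit 1000, A fails at depth 996 when called from the top level; the margin
-- below that covers the caller's own stack frames).
def Pre_weight_range (num : Int) (low : Int) (high : Int) : Prop :=
  (0 ≤ num ∨ high < low ∨ num < low) ∧ (num - max low 0 ≤ 900 ∨ high < low ∨ num < low)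
instance (num : Int) (low : Int) (high : Int) : Decidable (Pre_weight_range num low high) := by
  unfold Pre_weight_range; infer_instance

def pvWitness_weight_range : Int × Int × Int := (2, 1, 2)

-- When low < 0 ≤ high and num ≥ 0, A omits every weight-0 vector (its num==0 base case returns
-- before yielding the empty tuple), while B yields all vectors of weight in [low,high] including
-- the all-zeros vector, which is the intended set.
def D_weight_range (num : Int) (low : Int) (high : Int) : Prop :=
  0 ≤ num ∧ low < 0 ∧ 0 ≤ high
instance (num : Int) (low : Int) (high : Int) : Decidable (D_weight_range num low high) := by
  unfold D_weight_range; infer_instance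

def Spec_weight_range (num : Int) (low : Int) (high : Int) (out : List (List Int)) : Prop :=
  ¬ D_weight_range num low high → out = weight_range_alt num low high
instance (num : Int) (low : Int) (high : Int) (out : List (List Int)) : Decidable (Spec_weight_range num low high out) := by
  unfold Spec_weight_range; infer_instance

def pvDiffWitness_weight_range : Int × Int × Int := (1, -1, 1)
def pvDiffWitnessOut_weight_range : (List (List Int)) × (List (List Int)) := ([[1]], [[0], [1]])

-- ===== CLAIM (what is proved, stated in full; the proofs are below) =====
def Claim_unchanged_weight_range : Prop := ∀ (num : Int) (low : Int) (high : Int), Dom_weight_range num low high → Pre_weight_range num low high → Spec_weight_range num low high (weight_range num low high)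
def Claim_changed_weight_range : Prop := Dom_weight_range (pvDiffWitness_weight_range.1) (pvDiffWitness_weight_range.2.1) (pvDiffWitness_weight_range.2.2) ∧ Pre_weight_range (pvDiffWitness_weight_range.1) (pvDiffWitness_weight_range.2.1) (pvDiffWitness_weight_range.2.2) ∧ D_weight_range (pvDiffWitness_weight_range.1) (pvDiffWitness_weight_range.2.1) (pvDiffWitness_weight_range.2.2) ∧ weight_range (pvDiffWitness_weight_range.1) (pvDiffWitness_weight_range.2.1) (pvDiffWitness_weight_range.2.2) = pvDiffWitnessOut_weight_range.1 ∧ weight_range_alt (pvDiffWitness_weight_range.1) (pvDiffWitness_weight_range.2.1) (pvDiffWitness_weight_range.2.2) = pvDiffWitnessOut_weight_range.2 ∧ pvDiffWitnessOut_weight_range.1 ≠ pvDiffWitnessOut_weight_range.2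
def Claim_exact_weight_range : Prop := ∀ (num : Int) (low : Int) (high : Int), Dom_weight_range num low high → Pre_weight_range num low high → D_weight_range num low high → weight_range num low high ≠ weight_range_alt num low high

-- ===== LEMMAS AND PROOFS =====

-- proof-side helper: all 0/1 vectors of length n in lexicographic order
def pyProd01 : Nat → List (List Int)
  | 0 => [[]]
  | n + 1 => ([0, 1] : List Int).flatMap (fun a => (pyProd01 n).map (fun v => a :: v))

-- any two sufficient fuels compute the same list
theorem go_congr (f : Nat) : ∀ (g : Nat) (num low high : Int),
    (num - low).toNat + num.toNat < f → (num - low).toNat + num.toNat < g →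
    weight_range_go f num low high = weight_range_go g num low high := by
  induction f with
  | zero => intro g num low high h1 _; omega
  | succ f ih =>
    intro g num low high h1 h2
    cases g with
    | zero => omega
    | succ g =>
      simp only [weight_range_go]
      by_cases hg : low > high ∨ num < low
      · rw [if_pos hg, if_pos hg]
      · rw [if_neg hg, if_neg hg]
        by_cases he : num = low
        · rw [if_pos he, if_pos he]
        · rw [if_neg he, if_neg he]
          by_cases hz : num = 0
          · rw [if_pos hz, if_pos hz]
          · rw [if_neg hz, if_neg hz]
            rw [ih g (num - 1) low high (by omega) (by omega),
              ih g (num - 1) (max 0 (low - 1)) (high - 1) (by omega) (by omega)]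

-- the fuel-free one-step unfolding of A's recursion
theorem weight_range_unfold (num low high : Int) :
    weight_range num low high =
      if low > high ∨ num < low then []
      else if num = low then [List.replicate num.toNat 1]
      else if num = 0 then []
      else
        (weight_range (num - 1) low high).map (fun elt => 0 :: elt) ++
        (weight_range (num - 1) (max 0 (low - 1)) (high - 1)).map (fun elt => 1 :: elt) := by
  have step : weight_range num low high =
      if low > high ∨ num < low then []
      else if num = low then [List.replicate num.toNat 1]
      else if num = 0 then []
      else
        (weight_range_go ((num - low).toNat + num.toNat) (num - 1) low high).map
          (fun elt => 0 :: elt) ++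
        (weight_range_go ((num - low).toNat + num.toNat) (num - 1) (max 0 (low - 1))
          (high - 1)).map (fun elt => 1 :: elt) := rfl
  rw [step]
  by_cases hg : low > high ∨ num < low
  · rw [if_pos hg, if_pos hg]
  · rw [if_neg hg, if_neg hg]
    by_cases he : num = low
    · rw [if_pos he, if_pos he]
    · rw [if_neg he, if_neg he]
      by_cases hz : num = 0
      · rw [if_pos hz, if_pos hz]
      · rw [if_neg hz, if_neg hz]
        rw [go_congr ((num - low).toNat + num.toNat)
            (((num - 1) - low).toNat + (num - 1).toNat + 1) (num - 1) low high
            (by omega) (by omega),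
          go_congr ((num - low).toNat + num.toNat)
            (((num - 1) - (max 0 (low - 1))).toNat + (num - 1).toNat + 1)
            (num - 1) (max 0 (low - 1)) (high - 1) (by omega) (by omega)]
        rfl


theorem pyProd01_succ (n : Nat) :
    pyProd01 (n + 1) =
      (pyProd01 n).map (fun v => (0 : Int) :: v) ++ (pyProd01 n).map (fun v => (1 : Int) :: v) := by
  simp [pyProd01, List.flatMap]

theorem pyProd01_sum_bounds {n : Nat} {v : List Int} (h : v ∈ pyProd01 n) :
    0 ≤ v.sum ∧ v.sum ≤ (n : Int) := by
  induction n generalizing v with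
  | zero => simp [pyProd01] at h; simp [h]
  | succ n ih =>
    rw [pyProd01_succ] at h
    rcases List.mem_append.1 h with h' | h' <;>
      · rcases List.mem_map.1 h' with ⟨w, hw, rfl⟩
        have := ih hw
        simp only [List.sum_cons]
        push_cast
        omega

-- filter over a map that conses a fixed head
theorem filter_cons_map (a : Int) (p : List Int → Bool) (l : List (List Int)) :
    (l.map (fun v => a :: v)).filter p = (l.filter (fun v => p (a :: v))).map (fun v => a :: v) := by
  induction l with
  | nil => rfl
  | cons x xs ih =>
    simp only [List.map_cons, List.filter_cons]
    cases hp : p (a :: x) <;> simp [hp, ih]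

theorem filter_sum_eq_n (n : Nat) :
    (pyProd01 n).filter (fun v => decide (v.sum = (n : Int))) = [List.replicate n (1 : Int)] := by
  induction n with
  | zero => simp [pyProd01]
  | succ n ih =>
    rw [pyProd01_succ, List.filter_append]
    simp only [filter_cons_map]
    have e0 : (pyProd01 n).filter
        (fun v => decide (((0 : Int) :: v).sum = ((n + 1 : Nat) : Int))) = [] := by
      rw [List.filter_eq_nil_iff]
      intro v hv
      have hb := pyProd01_sum_bounds hv
      simp only [List.sum_cons, decide_eq_true_eq]
      omega
    have e1 : (pyProd01 n).filter
        (fun v => decide (((1 : Int) :: v).sum = ((n + 1 : Nat) : Int))) =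
        (pyProd01 n).filter (fun v => decide (v.sum = (n : Int))) := by
      apply List.filter_congr
      intro v hv
      rw [decide_eq_decide]
      simp only [List.sum_cons]
      push_cast
      omega
    rw [e0, e1, ih]
    simp [List.replicate_succ]

-- A with nonnegative num and nonnegative low equals the filtered enumeration.
theorem weight_range_eq_filter (n : Nat) :
    ∀ low high : Int, 0 ≤ low →
      weight_range (n : Int) low high =
        (pyProd01 n).filter (fun v => decide (low ≤ v.sum ∧ v.sum ≤ high)) := by
  induction n with
  | zero =>
    intro low high hlow
    rw [weight_range_unfold, show pyProd01 0 = [[]] from rfl]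
    simp only [List.filter_singleton]
    by_cases hh : low ≤ 0 ∧ 0 ≤ high
    · have hl0 : low = 0 := le_antisymm hh.1 hlow
      subst hl0
      have hguard : ¬((0 : Int) > high ∨ ((0 : Nat) : Int) < 0) := by omega
      rw [if_neg hguard, if_pos (by norm_num),
        show (decide ((0 : Int) ≤ ([] : List Int).sum ∧ ([] : List Int).sum ≤ high)) = true from
          by simp only [List.sum_nil, decide_eq_true_eq]; omega]
      simp
    · have hguard : low > high ∨ ((0 : Nat) : Int) < low := by omega
      rw [if_pos hguard,
        show (decide (low ≤ ([] : List Int).sum ∧ ([] : List Int).sum ≤ high)) = false from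
          by simp only [List.sum_nil, decide_eq_false_iff_not]; omega]
      rfl
  | succ n ih =>
    intro low high hlow
    rw [weight_range_unfold]
    by_cases hg : low > high ∨ ((n + 1 : Nat) : Int) < low
    · rw [if_pos hg, eq_comm, List.filter_eq_nil_iff]
      intro v hv
      have hb := pyProd01_sum_bounds hv
      intro hcon
      rw [decide_eq_true_eq] at hcon
      omega
    · push_neg at hg
      rw [if_neg (by push_neg; exact hg)]
      by_cases heq : ((n + 1 : Nat) : Int) = low
      · rw [if_pos heq]
        have hfc : (pyProd01 (n + 1)).filter (fun v => decide (low ≤ v.sum ∧ v.sum ≤ high)) =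
            (pyProd01 (n + 1)).filter (fun v => decide (v.sum = ((n + 1 : Nat) : Int))) := by
          apply List.filter_congr
          intro v hv
          have hb := pyProd01_sum_bounds hv
          have h2 := hg.1
          rw [decide_eq_decide]
          omega
        rw [hfc, filter_sum_eq_n]
        simp
      · rw [if_neg heq, if_neg (by omega)]
        have hc1 : ((n + 1 : Nat) : Int) - 1 = (n : Int) := by push_cast; ring
        rw [hc1, ih low high hlow, ih (max 0 (low - 1)) (high - 1) (le_max_left _ _)]
        rw [pyProd01_succ, List.filter_append]
        simp only [filter_cons_map]
        have e0 : (pyProd01 n).filter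
            (fun v => decide (low ≤ ((0 : Int) :: v).sum ∧ ((0 : Int) :: v).sum ≤ high)) =
            (pyProd01 n).filter (fun v => decide (low ≤ v.sum ∧ v.sum ≤ high)) := by
          apply List.filter_congr
          intro v hv
          rw [decide_eq_decide]
          simp only [List.sum_cons]
          omega
        have e1 : (pyProd01 n).filter
            (fun v => decide (low ≤ ((1 : Int) :: v).sum ∧ ((1 : Int) :: v).sum ≤ high)) =
            (pyProd01 n).filter (fun v => decide (max 0 (low - 1) ≤ v.sum ∧ v.sum ≤ high - 1)) := by
          apply List.filter_congr
          intro v hv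
          have hb := pyProd01_sum_bounds hv
          rw [decide_eq_decide]
          simp only [List.sum_cons]
          omega
        rw [e0, e1]

-- With a negative high bound A yields nothing.
theorem weight_range_nil_of_high_neg (n : Nat) :
    ∀ low high : Int, high < 0 → weight_range (n : Int) low high = [] := by
  induction n with
  | zero =>
    intro low high hh
    rw [weight_range_unfold]
    by_cases hg : low > high ∨ ((0 : Nat) : Int) < low
    · rw [if_pos hg]
    · push_neg at hg
      rw [if_neg (by push_neg; exact hg), if_neg (by omega),
        if_pos (by norm_num)]
  | succ n ih =>
    intro low high hh
    rw [weight_range_unfold]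
    by_cases hg : low > high ∨ ((n + 1 : Nat) : Int) < low
    · rw [if_pos hg]
    · push_neg at hg
      rw [if_neg (by push_neg; exact hg), if_neg (by omega), if_neg (by omega)]
      have hc1 : ((n + 1 : Nat) : Int) - 1 = (n : Int) := by push_cast; ring
      rw [hc1, ih low high hh]
      have h2 : weight_range (n : Int) (max 0 (low - 1)) (high - 1) = [] := by
        rw [weight_range_unfold, if_pos (by left; omega)]
      rw [h2]
      simp

-- Every vector A yields under a negative low contains a 1.
theorem weight_range_has_one (n : Nat) :
    ∀ low high : Int, low < 0 → ∀ v ∈ weight_range (n : Int) low high, (1 : Int) ∈ v := by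
  induction n with
  | zero =>
    intro low high hl v hv
    rw [weight_range_unfold] at hv
    by_cases hg : low > high ∨ ((0 : Nat) : Int) < low
    · rw [if_pos hg] at hv; simp at hv
    · rw [if_neg hg, if_neg (by push_cast; omega), if_pos (by norm_num)] at hv
      simp at hv
  | succ n ih =>
    intro low high hl v hv
    rw [weight_range_unfold] at hv
    by_cases hg : low > high ∨ ((n + 1 : Nat) : Int) < low
    · rw [if_pos hg] at hv; simp at hv
    · rw [if_neg hg, if_neg (by push_cast; omega), if_neg (by push_cast; omega)] at hv
      have hc1 : ((n + 1 : Nat) : Int) - 1 = (n : Int) := by push_cast; ring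
      rw [hc1] at hv
      rcases List.mem_append.1 hv with h' | h'
      · rcases List.mem_map.1 h' with ⟨w, hw, rfl⟩
        exact List.mem_cons_of_mem _ (ih low high hl w hw)
      · rcases List.mem_map.1 h' with ⟨w, hw, rfl⟩
        exact List.mem_cons_self

theorem replicate_zero_mem_pyProd01 (n : Nat) : List.replicate n (0 : Int) ∈ pyProd01 n := by
  induction n with
  | zero => simp [pyProd01]
  | succ n ih =>
    rw [pyProd01_succ, List.replicate_succ]
    exact List.mem_append_left _ (List.mem_map.2 ⟨_, ih, rfl⟩)

-- what a kept prefix (w, p) still produces with m positions left: every completion s whose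
-- total weight lands in [low, high], appended to p
def wrG (low : Int) (high : Int) (m : Nat) (wp : Int × List Int) : List (List Int) :=
  ((pyProd01 m).filter (fun s => decide (wp.1 + s.sum ≤ high ∧ low ≤ wp.1 + s.sum))).map
    (fun s => wp.2 ++ s)

theorem wrG_zero (low high : Int) (st : List (Int × List Int)) :
    (st.filter (fun wp => decide (low ≤ wp.1 ∧ wp.1 ≤ high))).map (fun wp => wp.2) =
      st.flatMap (wrG low high 0) := by
  induction st with
  | nil => rfl
  | cons wp st ih =>
    by_cases hc : low ≤ wp.1 ∧ wp.1 ≤ high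
    · rw [List.filter_cons, if_pos (by simpa using hc), List.map_cons, List.flatMap_cons, ih,
        show wrG low high 0 wp = [wp.2] from by
          simp only [wrG, pyProd01, List.filter_singleton]
          rw [show (decide (wp.1 + ([] : List Int).sum ≤ high ∧ low ≤ wp.1 + ([] : List Int).sum))
              = true from by simp only [List.sum_nil, decide_eq_true_eq]; omega]
          simp,
        List.singleton_append]
    · rw [List.filter_cons, if_neg (by simpa using hc), List.flatMap_cons, ih,
        show wrG low high 0 wp = [] from by
          simp only [wrG, pyProd01, List.filter_singleton]
          rw [show (decide (wp.1 + ([] : List Int).sum ≤ high ∧ low ≤ wp.1 + ([] : List Int).sum))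
              = false from by simp only [List.sum_nil, decide_eq_false_iff_not]; omega]
          simp,
        List.nil_append]

theorem wrG_cons_half (low high : Int) (m : Nat) (w : Int) (p : List Int) (b : Int) :
    ((pyProd01 m).filter
        (fun t => decide (w + ((b :: t).sum) ≤ high ∧ low ≤ w + ((b :: t).sum)))).map
      (fun t => p ++ (b :: t)) =
      wrG low high m (w + b, p ++ [b]) := by
  unfold wrG
  rw [show ((w + b, p ++ [b]) : Int × List Int).1 = w + b from rfl,
    show ((w + b, p ++ [b]) : Int × List Int).2 = p ++ [b] from rfl]
  have hf : (pyProd01 m).filter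
        (fun t => decide (w + ((b :: t).sum) ≤ high ∧ low ≤ w + ((b :: t).sum))) =
      (pyProd01 m).filter (fun s => decide (w + b + s.sum ≤ high ∧ low ≤ w + b + s.sum)) := by
    apply List.filter_congr
    intro t _
    rw [decide_eq_decide]
    simp only [List.sum_cons]
    omega
  rw [hf]
  apply List.map_congr_left
  intro t _
  simp

theorem wrG_half_nil (low high : Int) (m : Nat) (w : Int) (p : List Int) (b : Int)
    (hb : 0 ≤ b) (hc : ¬(w + b ≤ high ∧ low ≤ w + b + (m : Int))) :
    wrG low high m (w + b, p ++ [b]) = [] := by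
  unfold wrG
  rw [List.filter_eq_nil_iff.2, List.map_nil]
  intro s hs
  have hsb := pyProd01_sum_bounds hs
  intro hcon
  rw [decide_eq_true_eq] at hcon
  rw [show ((w + b, p ++ [b]) : Int × List Int).1 = w + b from rfl] at hcon
  omega

theorem wrG_step (low high : Int) (m : Nat) (wp : Int × List Int) :
    ((([0, 1] : List Int).filter
        (fun b => decide (wp.1 + b ≤ high ∧ low ≤ wp.1 + b + (m : Int)))).map
      (fun b => (wp.1 + b, wp.2 ++ [b]))).flatMap (wrG low high m) =
      wrG low high (m + 1) wp := by
  obtain ⟨w, p⟩ := wp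
  dsimp only
  have expand : wrG low high (m + 1) (w, p) =
      ((pyProd01 m).filter
          (fun t => decide (w + (((0 : Int) :: t).sum) ≤ high ∧
            low ≤ w + (((0 : Int) :: t).sum)))).map (fun t => p ++ ((0 : Int) :: t)) ++
      ((pyProd01 m).filter
          (fun t => decide (w + (((1 : Int) :: t).sum) ≤ high ∧
            low ≤ w + (((1 : Int) :: t).sum)))).map (fun t => p ++ ((1 : Int) :: t)) := by
    unfold wrG
    rw [pyProd01_succ, List.filter_append]
    simp only [filter_cons_map, List.map_append, List.map_map]
    rfl
  rw [expand, wrG_cons_half low high m w p 0, wrG_cons_half low high m w p 1]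
  by_cases c0 : w + 0 ≤ high ∧ low ≤ w + 0 + (m : Int) <;>
    by_cases c1 : w + 1 ≤ high ∧ low ≤ w + 1 + (m : Int)
  · rw [show ([0, 1] : List Int).filter
        (fun b => decide (w + b ≤ high ∧ low ≤ w + b + (m : Int))) = [0, 1] from by
      simp only [List.filter_cons, List.filter_nil]
      rw [if_pos (by simpa using c0), if_pos (by simpa using c1)]]
    simp
  · rw [show ([0, 1] : List Int).filter
        (fun b => decide (w + b ≤ high ∧ low ≤ w + b + (m : Int))) = [0] from by
      simp only [List.filter_cons, List.filter_nil]
      rw [if_pos (by simpa using c0), if_neg (by simpa using c1)]]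
    rw [wrG_half_nil low high m w p 1 (by omega) c1]
    simp
  · rw [show ([0, 1] : List Int).filter
        (fun b => decide (w + b ≤ high ∧ low ≤ w + b + (m : Int))) = [1] from by
      simp only [List.filter_cons, List.filter_nil]
      rw [if_neg (by simpa using c0), if_pos (by simpa using c1)]]
    rw [wrG_half_nil low high m w p 0 (by omega) c0]
    simp
  · rw [show ([0, 1] : List Int).filter
        (fun b => decide (w + b ≤ high ∧ low ≤ w + b + (m : Int))) = [] from by
      simp only [List.filter_cons, List.filter_nil]
      rw [if_neg (by simpa using c0), if_neg (by simpa using c1)]]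
    rw [wrG_half_nil low high m w p 0 (by omega) c0, wrG_half_nil low high m w p 1 (by omega) c1]
    simp

theorem wr_loop_spec (low high : Int) (m : Nat) :
    ∀ st : List (Int × List Int),
      ((wr_loop low high st m).filter (fun wp => decide (low ≤ wp.1 ∧ wp.1 ≤ high))).map
          (fun wp => wp.2) =
        st.flatMap (wrG low high m) := by
  induction m with
  | zero => intro st; exact wrG_zero low high st
  | succ m ih =>
    intro st
    rw [show wr_loop low high st (m + 1) = wr_loop low high (wr_step low high st (m : Int)) m
        from rfl,
      ih (wr_step low high st (m : Int))]
    unfold wr_step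
    rw [List.flatMap_assoc]
    exact congrArg (fun f => st.flatMap f) (funext fun wp => by
      rw [List.flatMap_map]
      exact (List.flatMap_map _ _ _).symm.trans (wrG_step low high m wp))

-- B computes the filtered enumeration whenever its guard passes
theorem weight_range_alt_eq_filter (num low high : Int) (hg : ¬(low > high ∨ num < low)) :
    weight_range_alt num low high =
      (pyProd01 num.toNat).filter (fun v => decide (low ≤ v.sum ∧ v.sum ≤ high)) := by
  rw [weight_range_alt, if_neg hg, wr_loop_spec low high num.toNat, List.flatMap_cons,
    List.flatMap_nil, List.append_nil]
  unfold wrG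
  rw [show (((0 : Int), ([] : List Int)) : Int × List Int).1 = (0 : Int) from rfl,
    show (((0 : Int), ([] : List Int)) : Int × List Int).2 = ([] : List Int) from rfl]
  have hf : (pyProd01 num.toNat).filter
      (fun s => decide ((0 : Int) + s.sum ≤ high ∧ low ≤ (0 : Int) + s.sum)) =
    (pyProd01 num.toNat).filter (fun v => decide (low ≤ v.sum ∧ v.sum ≤ high)) := by
    apply List.filter_congr
    intro s _
    rw [decide_eq_decide]
    omega
  rw [hf]
  have hm : ∀ l : List (List Int), l.map (fun s => ([] : List Int) ++ s) = l.map id := by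
    intro l
    apply List.map_congr_left
    intro a _
    simp
  rw [hm, List.map_id]

-- ===== VERDICT (by name: the statement is the Claim_ definition above) =====
theorem weight_range_spec : Claim_unchanged_weight_range := by
  intro num low high _ hpre hnd
  by_cases hg : low > high ∨ num < low
  · rw [weight_range_alt, if_pos hg, weight_range_unfold, if_pos hg]
  · rw [weight_range_alt_eq_filter num low high hg]
    push_neg at hg
    have hnum : 0 ≤ num := by
      rcases hpre.1 with h | h | h
      · exact h
      · omega
      · omega
    obtain ⟨n, rfl⟩ : ∃ n : Nat, num = (n : Int) := ⟨num.toNat, (Int.toNat_of_nonneg hnum).symm⟩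
    rw [Int.toNat_natCast]
    unfold D_weight_range at hnd
    push_neg at hnd
    by_cases hlow : 0 ≤ low
    · exact weight_range_eq_filter n low high hlow
    · have hhigh : high < 0 := hnd hnum (by omega)
      rw [weight_range_nil_of_high_neg n low high hhigh, eq_comm, List.filter_eq_nil_iff]
      intro v hv
      have hb := pyProd01_sum_bounds hv
      intro hcon
      rw [decide_eq_true_eq] at hcon
      omega

theorem weight_range_changed : Claim_changed_weight_range := by
  unfold Claim_changed_weight_range
  decide

theorem weight_range_tight : Claim_exact_weight_range := by
  intro num low high _ _ hd
  obtain ⟨hnum, hlow, hhigh⟩ := hd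
  intro heq
  have hz : List.replicate num.toNat (0 : Int) ∈ weight_range_alt num low high := by
    rw [weight_range_alt_eq_filter num low high (by push_neg; omega)]
    refine List.mem_filter.2 ⟨replicate_zero_mem_pyProd01 _, ?_⟩
    simp only [decide_eq_true_eq, List.sum_replicate, smul_zero]
    omega
  rw [← heq] at hz
  obtain ⟨n, hn⟩ : ∃ n : Nat, num = (n : Int) := ⟨num.toNat, (Int.toNat_of_nonneg hnum).symm⟩
  rw [hn] at hz
  have h1 := weight_range_has_one n low high hlow _ hz
  have := List.eq_of_mem_replicate h1
  omega
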